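-- pv_equiv track=rewrite | github.com/naomi397liu/AlgorithmPactice | Ood_shuffle.py | sum_vowel
-- ===== SOURCE A (Python) =====
-- def sum_vowel(s):
--
--     vowel_weight = {}
--     for i, vowel in enumerate(['a','e','i','o','u']):
--         vowel_weight[vowel] = i+1
--     s = list(s)
--
--     def helper(vowel_sum, s, vowel_weight):
--         if s == []:
--             return vowel_sum
--         char = s.pop()
--         if char in vowel_weight.keys():
--             vowel_sum += vowel_weight[char]
--         return helper(vowel_sum, s, vowel_weight)
--
--     return helper(0, s, vowel_weight)
-- ===== SOURCE B (Python) =====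
-- def sum_vowel(s):
--     weights = {'a': 1, 'e': 2, 'i': 3, 'o': 4, 'u': 5}
--     total = 0
--     for ch in s:
--         total += weights.get(ch, 0)
--     return total
-- ===== Notes on version B (the rewrite author's own statement) =====
-- stated objective: simpler
-- what changed: Replaced the recursion that pops characters off a list copy one by one (building the weight dict with enumerate) with a single direct for-loop over the string using a literal weight dict and dict.get.
import Mathlib
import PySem

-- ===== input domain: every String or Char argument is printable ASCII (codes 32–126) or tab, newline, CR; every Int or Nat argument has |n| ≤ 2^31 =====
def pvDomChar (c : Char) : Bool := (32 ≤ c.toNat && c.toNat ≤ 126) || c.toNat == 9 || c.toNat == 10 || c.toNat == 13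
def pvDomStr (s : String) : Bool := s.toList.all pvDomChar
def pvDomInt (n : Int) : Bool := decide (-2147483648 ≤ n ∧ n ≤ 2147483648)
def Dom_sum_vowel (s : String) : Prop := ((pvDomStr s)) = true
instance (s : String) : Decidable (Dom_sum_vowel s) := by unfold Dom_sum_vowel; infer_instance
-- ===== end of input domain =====

-- B replaces A's recursive helper that pops characters off a list copy (with a dict built by
-- enumerate) by a single direct fold over the string with a literal weight dict: simpler.

-- ===== PORT A =====
-- helper(vowel_sum, s, vowel_weight): pops the LAST element each call (Python list.pop()).
def pvHelperA (d : PySem.Dict Char Int) (vowel_sum : Int) (s : List Char) : Int :=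
  match h : PySem.List.pop? s (-1) with
  | none => vowel_sum            -- s == []
  | some (char, rest) =>
      have : rest.length < s.length := by
        have h2 : rest.length + 1 = s.length := PySem.List.length_of_pop?_eq_some s h
        omega
      pvHelperA d (if d.contains char then vowel_sum + d.getD char 0 else vowel_sum) rest
termination_by s.length

def sum_vowel (s : String) : Int :=
  let vowel_weight : PySem.Dict Char Int :=
    (PySem.List.enumerate ['a','e','i','o','u'] 0).foldl
      (fun d p => d.insert p.2 (p.1 + 1)) PySem.Dict.empty
  pvHelperA vowel_weight 0 s.toList

-- ===== PORT B =====
def sum_vowel_alt (s : String) : Int :=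
  let weights : PySem.Dict Char Int :=
    PySem.Dict.ofList [('a',1),('e',2),('i',3),('o',4),('u',5)]
  s.toList.foldl (fun total ch => total + weights.getD ch 0) 0

-- ===== PRECONDITION & SPEC =====
def Spec_sum_vowel (s : String) (out : Int) : Prop := out = sum_vowel_alt s
instance (s : String) (out : Int) : Decidable (Spec_sum_vowel s out) := by unfold Spec_sum_vowel; infer_instance

-- ===== CLAIM (what is proved, stated in full; the proofs are below) =====
def Claim_equal_sum_vowel : Prop := ∀ (s : String), Dom_sum_vowel s → Spec_sum_vowel s (sum_vowel s)

-- ===== LEMMAS AND PROOFS =====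

-- A's dict, built by the enumerate fold, is the literal dict B writes down.
theorem pvDictA_eq :
    (PySem.List.enumerate ['a','e','i','o','u'] 0).foldl
      (fun (d : PySem.Dict Char Int) p => d.insert p.2 (p.1 + 1)) PySem.Dict.empty
    = PySem.Dict.ofList [('a',1),('e',2),('i',3),('o',4),('u',5)] := by
  decide

def pvW : PySem.Dict Char Int := PySem.Dict.ofList [('a',1),('e',2),('i',3),('o',4),('u',5)]

theorem pvStep (acc : Int) (c : Char) :
    (if pvW.contains c then acc + pvW.getD c 0 else acc) = acc + pvW.getD c 0 := by
  by_cases h : pvW.contains c = true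
  · simp [h]
  · rw [if_neg (by simp [h]), PySem.Dict.getD_of_not_contains pvW 0 (by simpa using h)]
    omega

theorem pvHelper_eq (l : List Char) : ∀ acc : Int,
    pvHelperA pvW acc l = acc + l.foldl (fun total ch => total + pvW.getD ch 0) 0 := by
  induction l using List.reverseRecOn with
  | nil =>
    intro acc
    rw [pvHelperA]
    split
    next => simp
    next char rest h => simp [PySem.List.pop?] at h
  | append_singleton l c ih =>
    intro acc
    rw [pvHelperA]
    split
    next h =>
      rw [PySem.List.pop?_last] at h
      exact absurd h (by simp)
    next char rest h =>
      rw [PySem.List.pop?_last] at h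
      injection h with h
      cases h
      rw [pvStep, ih, List.foldl_append]
      simp only [List.foldl_cons, List.foldl_nil]
      omega

-- ===== VERDICT (by name: the statement is the Claim_ definition above) =====
theorem sum_vowel_spec : Claim_equal_sum_vowel := by
  intro s _
  unfold Spec_sum_vowel sum_vowel sum_vowel_alt
  rw [pvDictA_eq]
  show pvHelperA pvW 0 s.toList
    = List.foldl (fun total ch => total + pvW.getD ch 0) 0 s.toList
  rw [pvHelper_eq s.toList 0]; ring
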